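-- pv_equiv track=rewrite | github.com/averagephotographer/reverse-min-max | reversi.py | locations
-- ===== SOURCE A (Python) =====
-- def locations(board):
--     ones = []
--     twos = []
--     zeros = []
--
--     for i in range(len(board)):
--         for j in range(len(board[0])):
--             if board[i][j] == 1:
--                 ones.append((i, j))
--             elif board[i][j] == 2:
--                 twos.append((i, j))
--             else:
--                 zeros.append((i, j))
--
--     return ones, twos, zeros
-- ===== SOURCE B (Python) =====
-- def locations(board):
--     ones = [(i, j) for i in range(len(board)) for j in range(len(board[0])) if board[i][j] == 1]
--     twos = [(i, j) for i in range(len(board)) for j in range(len(board[0])) if board[i][j] == 2]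
--     zeros = [(i, j) for i in range(len(board)) for j in range(len(board[0])) if board[i][j] not in (1, 2)]
--     return ones, twos, zeros
-- ===== Notes on version B (the rewrite author's own statement) =====
-- stated objective: idiomatic
-- what changed: The single fused nested loop with three accumulators is replaced by three independent list comprehensions, each scanning the board once and filtering for one category.
import Mathlib
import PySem

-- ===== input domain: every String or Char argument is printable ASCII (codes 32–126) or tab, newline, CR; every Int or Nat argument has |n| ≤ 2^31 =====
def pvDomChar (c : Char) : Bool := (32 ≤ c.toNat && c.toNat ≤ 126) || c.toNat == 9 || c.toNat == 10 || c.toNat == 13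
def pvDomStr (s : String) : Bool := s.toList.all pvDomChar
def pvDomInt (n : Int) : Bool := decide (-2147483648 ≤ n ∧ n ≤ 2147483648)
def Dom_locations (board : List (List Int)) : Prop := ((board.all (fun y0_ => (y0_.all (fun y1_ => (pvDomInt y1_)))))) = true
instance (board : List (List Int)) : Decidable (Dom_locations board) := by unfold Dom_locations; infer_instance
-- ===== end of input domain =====

-- B replaces A's single fused nested loop by three independent filtering passes (idiomatic comprehensions).

-- ===== PORT A =====
-- literal port: nested for over range(len(board)) × range(len(board[0])), one accumulator triple;
-- board[i][j] is in range under Pre_, ported as pyGetD (default never read inside Pre_)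
def locations (board : List (List Int)) : (List (Int × Int)) × (List (Int × Int)) × (List (Int × Int)) :=
  (PySem.List.pyRange 0 (board.length : Int) 1).foldl
    (fun acc i =>
      (PySem.List.pyRange 0 ((PySem.List.pyGetD board 0 []).length : Int) 1).foldl
        (fun acc j =>
          let v := PySem.List.pyGetD (PySem.List.pyGetD board i []) j 0
          if v == 1 then (acc.1 ++ [(i, j)], acc.2.1, acc.2.2)
          else if v == 2 then (acc.1, acc.2.1 ++ [(i, j)], acc.2.2)
          else (acc.1, acc.2.1, acc.2.2 ++ [(i, j)]))
        acc)
    ([], [], [])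

-- ===== PORT B =====
-- three comprehensions, each a flatMap over rows of a filtered, mapped column range
def locations_alt (board : List (List Int)) : (List (Int × Int)) × (List (Int × Int)) × (List (Int × Int)) :=
  let ones := (PySem.List.pyRange 0 (board.length : Int) 1).flatMap (fun i =>
    (((PySem.List.pyRange 0 ((PySem.List.pyGetD board 0 []).length : Int) 1).filter
        (fun j => PySem.List.pyGetD (PySem.List.pyGetD board i []) j 0 == 1)).map (fun j => (i, j))))
  let twos := (PySem.List.pyRange 0 (board.length : Int) 1).flatMap (fun i =>
    (((PySem.List.pyRange 0 ((PySem.List.pyGetD board 0 []).length : Int) 1).filter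
        (fun j => PySem.List.pyGetD (PySem.List.pyGetD board i []) j 0 == 2)).map (fun j => (i, j))))
  let zeros := (PySem.List.pyRange 0 (board.length : Int) 1).flatMap (fun i =>
    (((PySem.List.pyRange 0 ((PySem.List.pyGetD board 0 []).length : Int) 1).filter
        (fun j => !(PySem.List.pyGetD (PySem.List.pyGetD board i []) j 0 == 1
                    || PySem.List.pyGetD (PySem.List.pyGetD board i []) j 0 == 2))).map (fun j => (i, j))))
  (ones, twos, zeros)

-- ===== PRECONDITION & SPEC =====
-- Pre_ excludes exactly the ragged boards on which both Pythons raise IndexError: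
-- some row is shorter than row 0, so board[i][j] is out of range for some scanned j.
def Pre_locations (board : List (List Int)) : Prop :=
  ∀ row ∈ board, (board.headD []).length ≤ row.length
instance (board : List (List Int)) : Decidable (Pre_locations board) := by unfold Pre_locations; infer_instance
def pvWitness_locations : List (List Int) := [[1, 2, 0], [0, 3, 1]]
def Spec_locations (board : List (List Int)) (out : (List (Int × Int)) × (List (Int × Int)) × (List (Int × Int))) : Prop := out = locations_alt board
instance (board : List (List Int)) (out : (List (Int × Int)) × (List (Int × Int)) × (List (Int × Int))) : Decidable (Spec_locations board out) := by unfold Spec_locations; infer_instance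

-- ===== CLAIM (what is proved, stated in full; the proofs are below) =====
def Claim_equal_locations : Prop := ∀ (board : List (List Int)), Dom_locations board → Pre_locations board → Spec_locations board (locations board)

-- ===== LEMMAS AND PROOFS =====

-- one step of A's inner loop, characterised: each scanned cell goes to exactly one component
theorem inner_fold_eq (v : Int → Int) (i : Int) (L : List Int)
    (a b c : List (Int × Int)) :
    L.foldl
      (fun acc j =>
        if v j == 1 then (acc.1 ++ [(i, j)], acc.2.1, acc.2.2)
        else if v j == 2 then (acc.1, acc.2.1 ++ [(i, j)], acc.2.2)
        else (acc.1, acc.2.1, acc.2.2 ++ [(i, j)]))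
      (a, b, c)
    = (a ++ ((L.filter (fun j => v j == 1)).map (fun j => (i, j))),
       b ++ ((L.filter (fun j => v j == 2)).map (fun j => (i, j))),
       c ++ ((L.filter (fun j => !(v j == 1 || v j == 2))).map (fun j => (i, j)))) := by
  induction L generalizing a b c with
  | nil => simp
  | cons x xs ih =>
    by_cases h1 : v x == 1
    · simp only [List.foldl_cons, h1, if_true]
      rw [ih]
      simp only [beq_iff_eq] at h1
      simp [h1]
    · by_cases h2 : v x == 2
      · simp only [List.foldl_cons, h1, h2, if_true, Bool.false_eq_true, if_false]
        rw [ih]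
        simp [h1, h2]
      · simp only [List.foldl_cons, h1, h2, Bool.false_eq_true, if_false]
        rw [ih]
        simp [h1, h2]

-- A's outer loop accumulates the three flatMaps of B
theorem outer_fold_eq (board : List (List Int)) (m : Int) (R : List Int)
    (a b c : List (Int × Int)) :
    R.foldl
      (fun acc i =>
        (PySem.List.pyRange 0 m 1).foldl
          (fun acc j =>
            let v := PySem.List.pyGetD (PySem.List.pyGetD board i []) j 0
            if v == 1 then (acc.1 ++ [(i, j)], acc.2.1, acc.2.2)
            else if v == 2 then (acc.1, acc.2.1 ++ [(i, j)], acc.2.2)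
            else (acc.1, acc.2.1, acc.2.2 ++ [(i, j)]))
          acc)
      (a, b, c)
    = (a ++ R.flatMap (fun i =>
          (((PySem.List.pyRange 0 m 1).filter
              (fun j => PySem.List.pyGetD (PySem.List.pyGetD board i []) j 0 == 1)).map (fun j => (i, j)))),
       b ++ R.flatMap (fun i =>
          (((PySem.List.pyRange 0 m 1).filter
              (fun j => PySem.List.pyGetD (PySem.List.pyGetD board i []) j 0 == 2)).map (fun j => (i, j)))),
       c ++ R.flatMap (fun i =>
          (((PySem.List.pyRange 0 m 1).filter
              (fun j => !(PySem.List.pyGetD (PySem.List.pyGetD board i []) j 0 == 1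
                          || PySem.List.pyGetD (PySem.List.pyGetD board i []) j 0 == 2))).map (fun j => (i, j))))) := by
  induction R generalizing a b c with
  | nil => simp
  | cons x xs ih =>
    simp only [List.foldl_cons, List.flatMap_cons]
    rw [inner_fold_eq (fun j => PySem.List.pyGetD (PySem.List.pyGetD board x []) j 0) x, ih]
    simp [List.append_assoc]

-- ===== VERDICT (by name: the statement is the Claim_ definition above) =====
theorem locations_spec : Claim_equal_locations := by
  intro board _ _
  show locations board = locations_alt board
  unfold locations locations_alt
  rw [outer_fold_eq]
  simp
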